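-- pv_equiv track=rewrite | github.com/iofu728/ProgrammingCode | leetcode/5695.py | maxScore
-- ===== SOURCE A (Python) =====
-- def maxScore(nums) -> int:
--     from math import gcd
--     nums.sort()
--     loop = len(nums) // 2
--
--     def bst(nums):
--         rt = []
--         g = gcd(nums[0], nums[1])
--         for i in range(len(nums) - 1):
--             for j in range(i + 1, len(nums)):
--                 ng = gcd(nums[i], nums[j])
--                 if g < ng:
--                     rt = [[nums[i], nums[j]]]
--                     g = ng
--                 if g == ng:
--                     rt.append([nums[i], nums[j]])
--
--         return rt, g
--
--     def dp(nums, loop):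
--         if loop == 0:
--             return 0
--         pairs, g = bst(nums)
--         rt = 0
--         for pair in pairs:
--             n = nums[:]
--             n.remove(pair[0])
--             n.remove(pair[1])
--             rt = max(rt, dp(n, loop - 1) + loop * g)
--         return rt
--
--     return dp(nums, loop)
-- ===== SOURCE B (Python) =====
-- def maxScore(nums) -> int:
--     from math import gcd
--     nums.sort()
--
--     def best(xs):
--         # two passes: max pairwise gcd, then all pairs (as values) achieving it
--         g = 0
--         for i in range(len(xs) - 1):
--             for j in range(i + 1, len(xs)):
--                 g = max(g, gcd(xs[i], xs[j]))
--         pairs = [(xs[i], xs[j]) for i in range(len(xs) - 1)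
--                  for j in range(i + 1, len(xs)) if gcd(xs[i], xs[j]) == g]
--         return pairs, g
--
--     memo = {}
--
--     def dp(xs, loop):
--         if loop == 0:
--             return 0
--         key = tuple(xs)
--         if key in memo:
--             return memo[key]
--         pairs, g = best(xs)
--         rt = 0
--         for a, b in pairs:
--             n = list(xs)
--             n.remove(a)
--             n.remove(b)
--             rt = max(rt, dp(n, loop - 1) + loop * g)
--         memo[key] = rt
--         return rt
--
--     return dp(nums, len(nums) // 2)
-- ===== Notes on version B (the rewrite author's own statement) =====
-- stated objective: faster
-- what changed: B replaces A's one-pass running-max/reset pair scan by a max-then-filter pass and memoizes the greedy recursion on the remaining sorted list as a dict key, so each reachable subproblem is expanded once; intended as faster — a timing run measured B 120.76x at the largest size both versions finished (n=16: A 515 ms vs B 1.4 ms), while at n=64 both time out.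
import Mathlib
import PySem

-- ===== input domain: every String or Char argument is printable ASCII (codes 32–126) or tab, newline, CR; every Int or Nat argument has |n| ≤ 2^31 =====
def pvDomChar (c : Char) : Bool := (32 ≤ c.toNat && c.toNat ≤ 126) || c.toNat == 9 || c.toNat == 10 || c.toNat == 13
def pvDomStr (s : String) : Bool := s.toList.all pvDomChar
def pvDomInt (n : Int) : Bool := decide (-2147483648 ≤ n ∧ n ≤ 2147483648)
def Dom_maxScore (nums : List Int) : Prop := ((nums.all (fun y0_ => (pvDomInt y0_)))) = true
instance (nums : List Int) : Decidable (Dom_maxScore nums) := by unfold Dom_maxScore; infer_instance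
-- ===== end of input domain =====

-- B memoizes the greedy recursion on the remaining (sorted) list, so each reachable
-- subproblem is expanded once; return-value equivalence only (A sorts `nums` in place, B does too).

-- ===== PORT A =====
-- math.gcd: nonnegative gcd of absolute values (exact for all ints)
def pyGcd (a b : Int) : Int := (Int.gcd a b : Int)

-- list.remove(x): drop the first occurrence; exact where x is present
-- (the only case either program reaches; Python raises ValueError otherwise)
def pyRemove (x : Int) : List Int → List Int
  | [] => []
  | y :: ys => if y = x then ys else y :: pyRemove x ys

-- the values (nums[i], nums[j]), i < j, in the order of the nested index loops
def pairsOf : List Int → List (Int × Int)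
  | [] => []
  | x :: xs => xs.map (fun y => (x, y)) ++ pairsOf xs

-- the body of A's nested loops: running (rt, g)
def bstStep (st : List (Int × Int) × Int) (p : Int × Int) : List (Int × Int) × Int :=
  let ng := pyGcd p.1 p.2
  let st1 := if st.2 < ng then ([p], ng) else st
  if st1.2 = ng then (st1.1 ++ [p], st1.2) else st1

def bstA (xs : List Int) : List (Int × Int) × Int :=
  (pairsOf xs).foldl bstStep ([], pyGcd (xs.headD 0) ((xs.drop 1).headD 0))

def dpA : Nat → List Int → Int
  | 0, _ => 0
  | loop + 1, xs =>
    let pg := bstA xs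
    pg.1.foldl
      (fun rt p =>
        max rt (dpA loop (pyRemove p.2 (pyRemove p.1 xs)) + ((loop : Int) + 1) * pg.2)) 0

def maxScore (nums : List Int) : Int :=
  let s := PySem.List.sorted nums (fun x => x) false
  dpA (s.length / 2) s

-- ===== PORT B =====
-- best: one pass for the maximum pairwise gcd, then the pairs achieving it
def bestG (xs : List Int) : Int :=
  (pairsOf xs).foldl (fun g p => max g (pyGcd p.1 p.2)) 0

def bestPairs (xs : List Int) (g : Int) : List (Int × Int) :=
  (pairsOf xs).filter (fun p => decide (pyGcd p.1 p.2 = g))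

-- memoized dp: the memo dict (key = the remaining sorted list) is threaded through
def dpB : Nat → PySem.Dict (List Int) Int → List Int → Int × PySem.Dict (List Int) Int
  | 0, memo, _ => (0, memo)
  | loop + 1, memo, xs =>
    match memo.get? xs with
    | some v => (v, memo)
    | none =>
      let g := bestG xs
      let r := (bestPairs xs g).foldl
        (fun (acc : Int × PySem.Dict (List Int) Int) p =>
          let rm := dpB loop acc.2 (pyRemove p.2 (pyRemove p.1 xs))
          (max acc.1 (rm.1 + ((loop : Int) + 1) * g), rm.2)) (0, memo)
      (r.1, r.2.insert xs r.1)

def maxScore_alt (nums : List Int) : Int :=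
  let s := PySem.List.sorted nums (fun x => x) false
  (dpB (s.length / 2) PySem.Dict.empty s).1

-- ===== PRECONDITION & SPEC =====
def Spec_maxScore (nums : List Int) (out : Int) : Prop := out = maxScore_alt nums
instance (nums : List Int) (out : Int) : Decidable (Spec_maxScore nums out) := by unfold Spec_maxScore; infer_instance

-- ===== CLAIM (what is proved, stated in full; the proofs are below) =====
def Claim_equal_maxScore : Prop := ∀ (nums : List Int), Dom_maxScore nums → Spec_maxScore nums (maxScore nums)

-- ===== LEMMAS AND PROOFS =====

-- running max of the pair gcds, A's init
def gfold (g : Int) (P : List (Int × Int)) : Int :=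
  P.foldl (fun a p => max a (pyGcd p.1 p.2)) g

lemma pyGcd_nonneg (a b : Int) : 0 ≤ pyGcd a b := Int.natCast_nonneg _

lemma gfold_init_le (P : List (Int × Int)) : ∀ g : Int, g ≤ gfold g P := by
  induction P with
  | nil => intro g; exact le_refl g
  | cons p P ih =>
      intro g
      exact le_trans (le_max_left g (pyGcd p.1 p.2)) (ih _)

-- characterisation of A's single scan: final g is the running max; final rt is the
-- filter of the max-achievers, with the first achiever duplicated when g rose
lemma scan (P : List (Int × Int)) : ∀ (rt : List (Int × Int)) (g : Int),
    (P.foldl bstStep (rt, g)).2 = gfold g P ∧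
    ((gfold g P = g ∧
        (P.foldl bstStep (rt, g)).1
          = rt ++ P.filter (fun p => decide (pyGcd p.1 p.2 = gfold g P))) ∨
      (g < gfold g P ∧ ∃ q rest,
        P.filter (fun p => decide (pyGcd p.1 p.2 = gfold g P)) = q :: rest ∧
        (P.foldl bstStep (rt, g)).1 = q :: q :: rest)) := by
  induction P with
  | nil =>
      intro rt g
      exact ⟨rfl, Or.inl ⟨rfl, by simp [gfold]⟩⟩
  | cons p P ih =>
      intro rt g
      simp only [List.foldl]
      rcases lt_trichotomy g (pyGcd p.1 p.2) with h | h | h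
      · -- g < ng : reset then self-append
        have hb : bstStep (rt, g) p = ([p, p], pyGcd p.1 p.2) := by
          simp [bstStep, h]
        have hg : gfold g (p :: P) = gfold (pyGcd p.1 p.2) P := by
          show gfold (max g (pyGcd p.1 p.2)) P = _
          rw [max_eq_right h.le]
        rw [hb, hg]
        rcases ih [p, p] (pyGcd p.1 p.2) with ⟨h2, h3⟩
        refine ⟨h2, Or.inr ?_⟩
        rcases h3 with ⟨he, hrt⟩ | ⟨hlt, q, rest, hf, hrt⟩
        · refine ⟨by rw [he]; exact h, p, P.filter _, ?_, by simpa using hrt⟩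
          simp [he]
        · refine ⟨lt_of_lt_of_le h (gfold_init_le P _), q, rest, ?_, hrt⟩
          rw [List.filter_cons]
          simp [hlt.ne, hf]
      · -- g = ng : append only
        have hb : bstStep (rt, g) p = (rt ++ [p], g) := by
          simp [bstStep, h]
        have hg : gfold g (p :: P) = gfold g P := by
          show gfold (max g (pyGcd p.1 p.2)) P = _
          rw [← h, max_self]
        rw [hb, hg]
        rcases ih (rt ++ [p]) g with ⟨h2, h3⟩
        refine ⟨h2, ?_⟩
        rcases h3 with ⟨he, hrt⟩ | ⟨hlt, q, rest, hf, hrt⟩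
        · refine Or.inl ⟨he, ?_⟩
          rw [he] at hrt ⊢
          rw [List.filter_cons]
          simp only [← h, decide_true, if_pos]
          simpa using hrt
        · refine Or.inr ⟨hlt, q, rest, ?_, hrt⟩
          rw [List.filter_cons]
          have : pyGcd p.1 p.2 ≠ gfold g P := by rw [← h]; exact hlt.ne
          simp [this, hf]
      · -- ng < g : nothing happens
        have hb : bstStep (rt, g) p = (rt, g) := by
          simp [bstStep, (lt_asymm h), h.ne']
        have hg : gfold g (p :: P) = gfold g P := by
          show gfold (max g (pyGcd p.1 p.2)) P = _
          rw [max_eq_left h.le]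
        rw [hb, hg]
        rcases ih rt g with ⟨h2, h3⟩
        refine ⟨h2, ?_⟩
        have hne : pyGcd p.1 p.2 ≠ gfold g P := by
          intro hc
          have hle := gfold_init_le P g
          rw [← hc] at hle
          exact absurd hle (not_le.mpr h)
        rcases h3 with ⟨he, hrt⟩ | ⟨hlt, q, rest, hf, hrt⟩
        · refine Or.inl ⟨he, ?_⟩
          rw [List.filter_cons]
          simp [hne, hrt]
        · refine Or.inr ⟨hlt, q, rest, ?_, hrt⟩
          rw [List.filter_cons]
          simp [hne, hf]

lemma mem_of_mem_pyRemove {a x : Int} {xs : List Int} (h : a ∈ pyRemove x xs) : a ∈ xs := by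
  induction xs with
  | nil => simpa [pyRemove] using h
  | cons y ys ih =>
      by_cases hy : y = x
      · simp [pyRemove, hy] at h; simp [h]
      · simp [pyRemove, hy] at h
        rcases h with h | h
        · simp [h]
        · exact List.mem_cons_of_mem _ (ih h)

lemma mem_pairsOf {p : Int × Int} {xs : List Int} (h : p ∈ pairsOf xs) :
    p.1 ∈ xs ∧ p.2 ∈ pyRemove p.1 xs := by
  induction xs with
  | nil => simp [pairsOf] at h
  | cons x t ih =>
      simp only [pairsOf, List.mem_append, List.mem_map] at h
      rcases h with ⟨y, hy, rfl⟩ | h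
      · exact ⟨List.mem_cons_self, by simp [pyRemove]; exact hy⟩
      · rcases ih h with ⟨h1, h2⟩
        refine ⟨List.mem_cons_of_mem _ h1, ?_⟩
        by_cases hx : x = p.1
        · simpa [pyRemove, hx] using mem_of_mem_pyRemove h2
        · simpa [pyRemove, hx] using Or.inr h2

lemma length_pyRemove {x : Int} {xs : List Int} (h : x ∈ xs) :
    (pyRemove x xs).length + 1 = xs.length := by
  induction xs with
  | nil => simp at h
  | cons y ys ih =>
      by_cases hy : y = x
      · simp [pyRemove, hy]
      · have hx : x ∈ ys := by
          rcases List.mem_cons.mp h with h' | h'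
          · exact absurd h'.symm hy
          · exact h'
        simp [pyRemove, hy, ih hx]

-- duplicated head does not change a running max
lemma fold_max_dup {α : Type} (f : α → Int) (q : α) (rest : List α) (a : Int) :
    (q :: q :: rest).foldl (fun rt p => max rt (f p)) a
      = (q :: rest).foldl (fun rt p => max rt (f p)) a := by
  simp only [List.foldl]
  rw [max_assoc, max_self]

def InvMemo (m : PySem.Dict (List Int) Int) : Prop :=
  ∀ k v, m.get? k = some v → v = dpA (k.length / 2) k

lemma bst_char (x0 x1 : Int) (t : List Int) :
    (bstA (x0 :: x1 :: t)).2 = bestG (x0 :: x1 :: t) ∧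
    ((bstA (x0 :: x1 :: t)).1 = bestPairs (x0 :: x1 :: t) (bestG (x0 :: x1 :: t)) ∨
      ∃ q rest, bestPairs (x0 :: x1 :: t) (bestG (x0 :: x1 :: t)) = q :: rest ∧
        (bstA (x0 :: x1 :: t)).1 = q :: q :: rest) := by
  obtain ⟨h2, h3⟩ := scan (pairsOf (x0 :: x1 :: t)) [] (pyGcd x0 x1)
  have hP : pairsOf (x0 :: x1 :: t)
      = (x0, x1) :: (t.map (fun y => (x0, y)) ++ pairsOf (x1 :: t)) := by
    simp [pairsOf]
  have hg : gfold (pyGcd x0 x1) (pairsOf (x0 :: x1 :: t)) = bestG (x0 :: x1 :: t) := by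
    unfold bestG gfold
    rw [hP]
    simp only [List.foldl]
    rw [max_self, max_eq_right (pyGcd_nonneg x0 x1)]
  rw [hg] at h2 h3
  have hA : bstA (x0 :: x1 :: t)
      = (pairsOf (x0 :: x1 :: t)).foldl bstStep ([], pyGcd x0 x1) := rfl
  constructor
  · rw [hA]; exact h2
  · rcases h3 with ⟨he, hrt⟩ | ⟨hlt, q, rest, hf, hrt⟩
    · left
      rw [hA, bestPairs]
      simpa using hrt
    · right
      exact ⟨q, rest, by rw [bestPairs]; exact hf, by rw [hA]; exact hrt⟩

lemma fold_thread (loop : Nat) (xs : List Int) (c : Int)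
    (hIH : ∀ m ys, InvMemo m → ys.length / 2 = loop →
      (dpB loop m ys).1 = dpA loop ys ∧ InvMemo (dpB loop m ys).2) :
    ∀ (P : List (Int × Int)) (a : Int) (m), InvMemo m →
      (∀ p ∈ P, (pyRemove p.2 (pyRemove p.1 xs)).length / 2 = loop) →
      (P.foldl
        (fun (acc : Int × PySem.Dict (List Int) Int) p =>
          let rm := dpB loop acc.2 (pyRemove p.2 (pyRemove p.1 xs))
          (max acc.1 (rm.1 + c), rm.2)) (a, m)).1
        = P.foldl (fun rt p => max rt (dpA loop (pyRemove p.2 (pyRemove p.1 xs)) + c)) a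
      ∧ InvMemo (P.foldl
        (fun (acc : Int × PySem.Dict (List Int) Int) p =>
          let rm := dpB loop acc.2 (pyRemove p.2 (pyRemove p.1 xs))
          (max acc.1 (rm.1 + c), rm.2)) (a, m)).2 := by
  intro P
  induction P with
  | nil => intro a m hm _; exact ⟨rfl, hm⟩
  | cons p P ih =>
      intro a m hm hlen
      simp only [List.foldl]
      obtain ⟨hv, hInv⟩ := hIH m (pyRemove p.2 (pyRemove p.1 xs)) hm (hlen p List.mem_cons_self)
      rw [hv]
      exact ih _ _ hInv (fun q hq => hlen q (List.mem_cons_of_mem _ hq))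

lemma dpB_correct : ∀ (loop : Nat) (m : PySem.Dict (List Int) Int) (xs : List Int),
    InvMemo m → xs.length / 2 = loop →
    (dpB loop m xs).1 = dpA loop xs ∧ InvMemo (dpB loop m xs).2 := by
  intro loop
  induction loop with
  | zero => intro m xs hm _; exact ⟨rfl, hm⟩
  | succ loop ih =>
      intro m xs hm hlen
      rcases hget : m.get? xs with _ | v
      · -- not memoized: compute, then insert
        have h2 : 2 ≤ xs.length := by omega
        obtain ⟨x0, x1, t, rfl⟩ : ∃ x0 x1 t, xs = x0 :: x1 :: t := by
          match xs, h2 with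
          | x0 :: x1 :: t, _ => exact ⟨x0, x1, t, rfl⟩
        simp only [dpB, hget]
        have hchild : ∀ p ∈ bestPairs (x0 :: x1 :: t) (bestG (x0 :: x1 :: t)),
            (pyRemove p.2 (pyRemove p.1 (x0 :: x1 :: t))).length / 2 = loop := by
          intro p hp
          obtain ⟨hp1, hp2⟩ := mem_pairsOf (List.mem_of_mem_filter hp)
          have hl1 := length_pyRemove hp1
          have hl2 := length_pyRemove hp2
          omega
        obtain ⟨hft1, hft2⟩ := fold_thread loop (x0 :: x1 :: t)
          (((loop : Int) + 1) * bestG (x0 :: x1 :: t)) ih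
          (bestPairs (x0 :: x1 :: t) (bestG (x0 :: x1 :: t))) 0 m hm hchild
        obtain ⟨hg2, hcase⟩ := bst_char x0 x1 t
        have hpure : dpA (loop + 1) (x0 :: x1 :: t)
            = (bestPairs (x0 :: x1 :: t) (bestG (x0 :: x1 :: t))).foldl
                (fun rt p => max rt (dpA loop (pyRemove p.2 (pyRemove p.1 (x0 :: x1 :: t)))
                  + ((loop : Int) + 1) * bestG (x0 :: x1 :: t))) 0 := by
          simp only [dpA]
          rw [hg2]
          rcases hcase with heq | ⟨q, rest, hf, hrt⟩
          · rw [heq]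
          · rw [hrt, hf, fold_max_dup]
        constructor
        · rw [hft1, hpure]
        · intro k v hk
          rw [PySem.Dict.get?_insert] at hk
          by_cases hkx : k = x0 :: x1 :: t
          · rw [if_pos hkx] at hk
            cases hk
            subst hkx
            rw [hlen, hft1, hpure]
          · rw [if_neg hkx] at hk
            exact hft2 _ _ hk
      · -- memoized hit
        simp only [dpB, hget]
        have hv := hm xs v hget
        rw [hlen] at hv
        exact ⟨hv, hm⟩

-- ===== VERDICT (by name: the statement is the Claim_ definition above) =====
theorem maxScore_spec : Claim_equal_maxScore := by
  intro nums _
  unfold Spec_maxScore maxScore maxScore_alt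
  have hinv : InvMemo PySem.Dict.empty := by
    intro k v h
    simp [PySem.Dict.get?_empty] at h
  exact ((dpB_correct _ _ _ hinv rfl).1).symm
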